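-- pv_equiv track=rewrite | github.com/Hybin/ConstructionHunter | src/utils.py | segments_filling
-- ===== SOURCE A (Python) =====
-- def segments_filling(segments, sentence):
--     """
--     Filling the blanks of segments
--
--     :param segments: list[tuple]
--     :param sentence: string
--     :return:
--     """
--     ranges, size = list(), len(segments)
--
--     for i in range(size):
--         left, right = segments[i]
--
--         # Blanks at first
--         if i == 0 and left != 0:
--             ranges.append((0, left))
--
--         # Blanks at middle
--         if i > 0:
--             tail, head = segments[i - 1][1], segments[i][0]
--
--             if tail != head:
--                 ranges.append((tail, head))
--
--         ranges.append((left, right))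
--
--         # Blanks at last
--         if i == size - 1 and right != len(sentence):
--             ranges.append((right, len(sentence)))
--
--     return ranges
-- ===== SOURCE B (Python) =====
-- def segments_filling(segments, sentence):
--     """Fill gaps via the flat boundary-point list of the interval chain."""
--     if not segments:
--         return []
--     points = [0]
--     for left, right in segments:
--         points.append(left)
--         points.append(right)
--     points.append(len(sentence))
--     ranges = []
--     gap = True
--     for a, b in zip(points, points[1:]):
--         if gap:
--             if a != b:
--                 ranges.append((a, b))
--         else:
--             ranges.append((a, b))
--         gap = not gap
--     return ranges
-- ===== Notes on version B (the rewrite author's own statement) =====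
-- stated objective: alternative
-- what changed: B changes representation: it flattens the intervals into one boundary-point list [0, l1, r1, ..., ln, rn, len(sentence)] and reconstructs the output by pairing consecutive points with an alternating gap/segment parity flag (gap pairs kept only when non-degenerate), replacing A's per-segment index loop with i==0/i>0/i==size-1 special cases.
import Mathlib
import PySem

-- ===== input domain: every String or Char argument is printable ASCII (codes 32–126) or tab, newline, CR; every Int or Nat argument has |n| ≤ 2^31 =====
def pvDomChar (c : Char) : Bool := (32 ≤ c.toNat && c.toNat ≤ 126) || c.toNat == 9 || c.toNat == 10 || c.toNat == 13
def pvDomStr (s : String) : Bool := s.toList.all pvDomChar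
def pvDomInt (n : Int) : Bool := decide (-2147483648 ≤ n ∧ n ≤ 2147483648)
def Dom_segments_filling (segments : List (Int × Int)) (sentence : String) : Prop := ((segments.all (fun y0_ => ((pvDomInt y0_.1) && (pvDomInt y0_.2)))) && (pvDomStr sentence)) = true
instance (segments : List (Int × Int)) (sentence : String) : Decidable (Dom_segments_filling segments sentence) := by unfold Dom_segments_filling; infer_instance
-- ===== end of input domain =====

-- B trades A's indexed per-segment loop (with i==0 / i>0 / i==size-1 cases) for a different
-- representation: the flat boundary-point list [0, l1, r1, ..., ln, rn, len(sentence)], walked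
-- pairwise with an alternating gap/segment parity flag. Same O(n) cost.
-- ===== PORT A =====
-- loop body of A's `for i in range(size)` (named so the proofs can speak about one step)
def pvBodyA (segments : List (Int × Int)) (slen : Int)
    (ranges : List (Int × Int)) (i : Int) : List (Int × Int) :=
  let seg := PySem.List.pyGetD segments i (0, 0)
  let left := seg.1
  let right := seg.2
  -- Blanks at first
  let ranges := if i = 0 ∧ left ≠ 0 then ranges ++ [((0 : Int), left)] else ranges
  -- Blanks at middle
  let ranges :=
    if 0 < i then
      let tail := (PySem.List.pyGetD segments (i - 1) (0, 0)).2
      let head := (PySem.List.pyGetD segments i (0, 0)).1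
      if tail ≠ head then ranges ++ [(tail, head)] else ranges
    else ranges
  let ranges := ranges ++ [(left, right)]
  -- Blanks at last
  if i = (segments.length : Int) - 1 ∧ right ≠ slen then ranges ++ [(right, slen)] else ranges

def segments_filling (segments : List (Int × Int)) (sentence : String) : List (Int × Int) :=
  (PySem.List.pyRange 0 (segments.length : Int) 1).foldl
    (pvBodyA segments (PySem.Str.len sentence)) []

-- ===== PORT B =====
-- loop body of B's `for a, b in zip(points, points[1:])`: state = (ranges, gap)
def pvBodyB (st : List (Int × Int) × Bool) (p : Int × Int) : List (Int × Int) × Bool :=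
  let ranges := st.1
  let gap := st.2
  let ranges :=
    if gap then (if p.1 ≠ p.2 then ranges ++ [p] else ranges)
    else ranges ++ [p]
  (ranges, !gap)

def segments_filling_alt (segments : List (Int × Int)) (sentence : String) : List (Int × Int) :=
  if segments.isEmpty then []
  else
    -- points = [0]; for l, r in segments: append l; append r; then append len(sentence)
    let points : List Int :=
      (segments.foldl (fun acc p => acc ++ [p.1, p.2]) [(0 : Int)]) ++ [PySem.Str.len sentence]
    -- zip(points, points[1:])
    (((points.zip (PySem.List.slice points (some 1) none)).foldl pvBodyB ([], true))).1

-- ===== PRECONDITION & SPEC =====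
def Spec_segments_filling (segments : List (Int × Int)) (sentence : String) (out : List (Int × Int)) : Prop := out = segments_filling_alt segments sentence
instance (segments : List (Int × Int)) (sentence : String) (out : List (Int × Int)) : Decidable (Spec_segments_filling segments sentence out) := by unfold Spec_segments_filling; infer_instance

-- ===== CLAIM (what is proved, stated in full; the proofs are below) =====
def Claim_equal_segments_filling : Prop := ∀ (segments : List (Int × Int)) (sentence : String), Dom_segments_filling segments sentence → Spec_segments_filling segments sentence (segments_filling segments sentence)

-- ===== LEMMAS AND PROOFS =====

-- reference shape: segments with the gap before each one, prev bound carried along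
def goNT : Int → List (Int × Int) → List (Int × Int)
  | _, [] => []
  | p, (l, r) :: t => (if p ≠ l then [(p, l)] else []) ++ (l, r) :: goNT r t

-- right bound of the last of xs, p if xs is empty
def lastSnd (p : Int) (xs : List (Int × Int)) : Int := ((xs.getLast?).map (·.2)).getD p

theorem lastSnd_cons (p : Int) (x : Int × Int) (xs : List (Int × Int)) :
    lastSnd p (x :: xs) = lastSnd x.2 xs := by
  cases xs with
  | nil => simp [lastSnd]
  | cons a b =>
    rcases h : (a :: b).getLast? with _ | z
    · simp at h
    · simp [lastSnd, h]

theorem goNT_append (xs : List (Int × Int)) (y : Int × Int) : ∀ p,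
    goNT p (xs ++ [y]) =
      goNT p xs ++ (if lastSnd p xs ≠ y.1 then [(lastSnd p xs, y.1)] else []) ++ [y] := by
  induction xs with
  | nil => intro p; simp [goNT, lastSnd]
  | cons x t ih =>
    intro p
    obtain ⟨l, r⟩ := x
    simp only [List.cons_append, goNT, ih r, lastSnd_cons]
    split <;> simp

theorem lastSnd_take (segs : List (Int × Int)) (k : Nat) (hk0 : 0 < k) (hk : k ≤ segs.length) :
    lastSnd 0 (segs.take k) = (segs.getD (k - 1) (0, 0)).2 := by
  have hlen : (segs.take k).length = k := by simp [hk]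
  have h1 : k - 1 < segs.length := by omega
  have : (segs.take k).getLast? = some segs[k - 1] := by
    rw [List.getLast?_eq_getElem?, hlen]
    simp [hk0, h1]
  simp [lastSnd, this, List.getD_eq_getElem?_getD, List.getElem?_eq_getElem h1]

theorem take_succ_concat (segs : List (Int × Int)) (k : Nat) (hk : k < segs.length) :
    segs.take (k + 1) = segs.take k ++ [segs.getD k (0, 0)] := by
  rw [List.take_add_one]
  simp [List.getElem?_eq_getElem hk, List.getD_eq_getElem?_getD]

theorem bodyA_step (segs : List (Int × Int)) (slen : Int) (acc : List (Int × Int))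
    (k : Nat) (hk : k < segs.length) :
    pvBodyA segs slen acc (k : Int) =
      (acc ++ (if lastSnd 0 (segs.take k) ≠ (segs.getD k (0, 0)).1
          then [(lastSnd 0 (segs.take k), (segs.getD k (0, 0)).1)] else [])
        ++ [segs.getD k (0, 0)])
      ++ (if k = segs.length - 1 ∧ (segs.getD k (0, 0)).2 ≠ slen
          then [((segs.getD k (0, 0)).2, slen)] else []) := by
  have hlast : ((k : Int) = (segs.length : Int) - 1) ↔ k = segs.length - 1 := by omega
  by_cases hk0 : k = 0
  · subst hk0
    unfold pvBodyA
    simp only [Nat.cast_zero, PySem.List.pyGetD_zero, lastSnd, List.take_zero,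
      List.getLast?_nil, Option.map_none, Option.getD_none, true_and]
    split_ifs <;> (try omega) <;> simp [List.append_assoc]
  · unfold pvBodyA
    have hne : ¬ (((k : Nat) : Int) = 0) := by omega
    have hpos : (0 : Int) < (k : Int) := by omega
    have hsub : ((k : Int) - 1) = ((k - 1 : Nat) : Int) := by omega
    simp only [PySem.List.pyGetD_natCast, hne, false_and, if_false, hpos, if_true, hsub,
      hlast, lastSnd_take segs k (by omega) (by omega)]
    split_ifs <;> simp [List.append_assoc]

theorem A_prefix (segs : List (Int × Int)) (slen : Int) :
    ∀ k : Nat, k + 1 ≤ segs.length →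
      (PySem.List.pyRange 0 (k : Int) 1).foldl (pvBodyA segs slen) [] = goNT 0 (segs.take k) := by
  intro k
  induction k with
  | zero => intro _; simp [PySem.List.pyRange_one_eq_nil, goNT]
  | succ k ih =>
    intro hk
    have hcast : ((k : Int) + 1) = ((k + 1 : Nat) : Int) := by push_cast; ring
    rw [← hcast, PySem.List.pyRange_one_succ_right (by positivity), List.foldl_append,
      ih (by omega), List.foldl_cons, List.foldl_nil, bodyA_step segs slen _ k (by omega)]
    have hnl : ¬ (k = segs.length - 1) := by omega
    rw [take_succ_concat segs k (by omega), goNT_append]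
    simp [hnl, List.append_assoc]

theorem A_full (segs : List (Int × Int)) (slen : Int) (h : segs ≠ []) :
    (PySem.List.pyRange 0 (segs.length : Int) 1).foldl (pvBodyA segs slen) [] =
      goNT 0 segs ++
        (if lastSnd 0 segs ≠ slen then [(lastSnd 0 segs, slen)] else []) := by
  obtain ⟨m, hm⟩ : ∃ m, segs.length = m + 1 := by
    cases hl : segs.length with
    | zero => exact absurd (List.length_eq_zero_iff.mp hl) h
    | succ m => exact ⟨m, rfl⟩
  have hmm : segs.length - 1 = m := by omega
  have hcast : ((segs.length : Int)) = ((m : Int) + 1) := by omega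
  have hwhole : segs.take (m + 1) = segs := List.take_of_length_le (by omega)
  have hlast : lastSnd 0 segs = (segs.getD m (0, 0)).2 := by
    rw [← hwhole, lastSnd_take segs (m + 1) (by omega) (by omega)]; simp [hwhole]
  rw [hcast, PySem.List.pyRange_one_succ_right (by positivity), List.foldl_append,
    A_prefix segs slen m (by omega), List.foldl_cons, List.foldl_nil,
    bodyA_step segs slen _ m (by omega), hmm]
  have hsplit : goNT 0 segs = goNT 0 (segs.take m) ++
      (if lastSnd 0 (segs.take m) ≠ (segs.getD m (0, 0)).1
        then [(lastSnd 0 (segs.take m), (segs.getD m (0, 0)).1)] else []) ++ [segs.getD m (0, 0)] := by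
    conv_lhs => rw [← hwhole, take_succ_concat segs m (by omega)]
    exact goNT_append _ _ 0
  rw [hsplit, hlast]
  simp [List.append_assoc]

-- B-side reference: pairwise walk over the boundary points with alternating parity
def walk : Bool → List Int → List (Int × Int)
  | gap, a :: b :: rest =>
      (if gap then (if a ≠ b then [(a, b)] else []) else [(a, b)]) ++ walk (!gap) (b :: rest)
  | _, _ => []

theorem B_zip_foldl (pts : List Int) : ∀ (acc : List (Int × Int)) (gap : Bool),
    ((pts.zip pts.tail).foldl pvBodyB (acc, gap)).1 = acc ++ walk gap pts := by
  induction pts with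
  | nil => intro acc gap; simp [walk]
  | cons a rest ih =>
    intro acc gap
    cases rest with
    | nil => simp [walk]
    | cons b r =>
      have : (a :: b :: r).tail = b :: r := rfl
      simp only [this, List.zip_cons_cons, List.foldl_cons, walk]
      have hbr : (b :: r).zip r = (b :: r).zip (b :: r).tail := rfl
      rw [show pvBodyB (acc, gap) (a, b) =
          ((if gap then (if a ≠ b then acc ++ [(a, b)] else acc) else acc ++ [(a, b)]), !gap)
        from by simp [pvBodyB], hbr, ih]
      cases gap <;> simp
      split <;> simp

-- the flat point list of the segments
def flatPts (segs : List (Int × Int)) : List Int := segs.flatMap (fun p => [p.1, p.2])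

theorem walk_flat (segs : List (Int × Int)) : ∀ (p L : Int),
    walk true (p :: flatPts segs ++ [L]) =
      goNT p segs ++ (if lastSnd p segs ≠ L then [(lastSnd p segs, L)] else []) := by
  induction segs with
  | nil => intro p L; simp [flatPts, goNT, lastSnd, walk]
  | cons x t ih =>
    intro p L
    obtain ⟨l, r⟩ := x
    have hfl : flatPts ((l, r) :: t) = l :: r :: flatPts t := by simp [flatPts]
    rw [hfl]
    have h1 : walk true (p :: l :: (r :: flatPts t ++ [L])) =
        (if p ≠ l then [(p, l)] else []) ++ walk false (l :: (r :: flatPts t ++ [L])) := rfl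
    have h2 : walk false (l :: (r :: flatPts t ++ [L])) =
        [(l, r)] ++ walk true (r :: flatPts t ++ [L]) := rfl
    show walk true (p :: l :: (r :: flatPts t ++ [L])) = _
    rw [h1, h2, ih r L]
    simp only [goNT, lastSnd_cons]
    split <;> simp

theorem B_full (segs : List (Int × Int)) (sentence : String) (h : segs ≠ []) :
    segments_filling_alt segs sentence =
      goNT 0 segs ++
        (if lastSnd 0 segs ≠ PySem.Str.len sentence
          then [(lastSnd 0 segs, PySem.Str.len sentence)] else []) := by
  have hne : ¬ segs.isEmpty := by simpa [List.isEmpty_iff] using h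
  have hpts : segs.foldl (fun acc p => acc ++ [p.1, p.2]) [(0 : Int)] = 0 :: flatPts segs := by
    rw [PySem.List.foldl_append_eq_flatMap]; rfl
  simp only [segments_filling_alt, hne, if_false, Bool.false_eq_true,
    PySem.List.slice_from_one, hpts]
  rw [show (0 : Int) :: flatPts segs ++ [PySem.Str.len sentence]
        = 0 :: (flatPts segs ++ [PySem.Str.len sentence]) from rfl,
    B_zip_foldl, List.nil_append, ← List.cons_append, walk_flat]

-- ===== VERDICT (by name: the statement is the Claim_ definition above) =====
theorem segments_filling_spec : Claim_equal_segments_filling := by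
  intro segs sentence _
  unfold Spec_segments_filling
  by_cases h : segs = []
  · subst h
    simp [segments_filling, segments_filling_alt, PySem.List.pyRange_one_eq_nil]
  · rw [segments_filling, A_full segs (PySem.Str.len sentence) h, B_full segs sentence h]
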